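-- pv_equiv track=rewrite | github.com/inistory/daily_coding | 프로그래머스/level2/귤고르기.py | solution
-- ===== SOURCE A (Python) =====
-- def solution(k, tangerine):
--     answer = 0
--     guel = {}
--     for i,g in enumerate(tangerine):
--         if g not in guel:
--             guel[g] = 1
--         else:
--             guel[g] += 1
--
--     sorted_guel = sorted(guel.items(), key=lambda x: x[1], reverse=True)
--
--     for key, value in sorted_guel:
--         k = k - value
--         answer += 1
--         if k <= 0:
--             break
--
--     return answer
-- ===== SOURCE B (Python) =====
-- def solution(k, tangerine):
--     # Bucket the frequencies instead of sorting them.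
--     counts = {}
--     for g in tangerine:
--         counts[g] = counts.get(g, 0) + 1
--     n = len(tangerine)
--     bucket = [0] * (n + 1)  # bucket[c] = number of distinct sizes occurring exactly c times
--     for c in counts.values():
--         bucket[c] += 1
--     answer = 0
--     remaining = k
--     for c in range(n, 0, -1):
--         for _ in range(bucket[c]):
--             remaining -= c
--             answer += 1
--             if remaining <= 0:
--                 return answer
--     return answer
-- ===== Notes on version B (the rewrite author's own statement) =====
-- stated objective: alternative
-- what changed: B replaces A's comparison sort of the (size, frequency) pairs by bucketing frequencies into a count array and scanning the buckets from the largest frequency down; measured running time is comparable.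
import Mathlib
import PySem

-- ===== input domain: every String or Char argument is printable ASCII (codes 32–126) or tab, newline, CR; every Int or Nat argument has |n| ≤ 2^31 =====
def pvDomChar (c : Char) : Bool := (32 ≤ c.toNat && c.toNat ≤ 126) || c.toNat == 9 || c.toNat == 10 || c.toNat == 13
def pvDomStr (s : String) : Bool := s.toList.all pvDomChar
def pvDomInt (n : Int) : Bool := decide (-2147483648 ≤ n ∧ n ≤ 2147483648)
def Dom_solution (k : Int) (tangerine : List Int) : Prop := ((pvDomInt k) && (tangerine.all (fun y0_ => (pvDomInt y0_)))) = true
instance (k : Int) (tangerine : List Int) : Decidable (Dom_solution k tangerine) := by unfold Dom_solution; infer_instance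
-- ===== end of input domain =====

-- B replaces A's sort of the (size, frequency) pairs by bucketing the frequencies
-- into a count array and scanning it from the largest frequency down (alternative greedy).

-- ===== PORT A =====
-- the 'for key, value in sorted_guel' loop with its break
def solLoopA : List (Int × Int) → Int → Int → Int
  | [], _, answer => answer
  | kv :: rest, k, answer =>
      let k' := k - kv.2
      let answer' := answer + 1
      if k' ≤ 0 then answer' else solLoopA rest k' answer'

def solution (k : Int) (tangerine : List Int) : Int :=
  let guel := (PySem.List.enumerate tangerine 0).foldl
      (fun d ig => if ¬ d.contains ig.2 then d.insert ig.2 1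
                   else d.insert ig.2 (d.getD ig.2 0 + 1)) PySem.Dict.empty
  let sorted_guel := PySem.List.sorted guel.items (fun x => x.2) true
  solLoopA sorted_guel k 0

-- ===== PORT B =====
-- the inner 'for _ in range(bucket[c])' loop; Bool = an early 'return answer' fired
def takeGroupsB (c : Int) : Nat → Int → Int → Int × Int × Bool
  | 0, remaining, answer => (remaining, answer, false)
  | g + 1, remaining, answer =>
      let remaining' := remaining - c
      let answer' := answer + 1
      if remaining' ≤ 0 then (remaining', answer', true)
      else takeGroupsB c g remaining' answer'

-- the outer 'for c in range(n, 0, -1)' loop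
def bucketLoopB (bucket : List Int) : List Int → Int → Int → Int
  | [], _, answer => answer
  | c :: cs, remaining, answer =>
      match takeGroupsB c (PySem.List.pyGetD bucket c 0).toNat remaining answer with
      | (_, answer', true) => answer'
      | (remaining', answer', false) => bucketLoopB bucket cs remaining' answer'

def solution_alt (k : Int) (tangerine : List Int) : Int :=
  let counts := tangerine.foldl (fun d g => d.insert g (d.getD g 0 + 1)) PySem.Dict.empty
  let n : Int := tangerine.length
  -- bucket indices are element counts c with 1 ≤ c ≤ n, so '.toNat' / pyGetD are exact here
  let bucket := counts.values.foldl
      (fun (b : List Int) (c : Int) => b.set c.toNat (PySem.List.pyGetD b c 0 + 1))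
      (List.replicate (n.toNat + 1) 0)
  bucketLoopB bucket (PySem.List.pyRange n 0 (-1)) k 0

-- ===== PRECONDITION & SPEC =====
def Spec_solution (k : Int) (tangerine : List Int) (out : Int) : Prop := out = solution_alt k tangerine
instance (k : Int) (tangerine : List Int) (out : Int) : Decidable (Spec_solution k tangerine out) := by unfold Spec_solution; infer_instance

-- ===== CLAIM (what is proved, stated in full; the proofs are below) =====
def Claim_equal_solution : Prop := ∀ (k : Int) (tangerine : List Int), Dom_solution k tangerine → Spec_solution k tangerine (solution k tangerine)

-- ===== LEMMAS AND PROOFS =====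

-- Both loops consume a weakly descending list of frequencies; this is the common core.
def pvValLoop : List Int → Int → Int → Int
  | [], _, answer => answer
  | v :: vs, k, answer =>
      if k - v ≤ 0 then answer + 1 else pvValLoop vs (k - v) (answer + 1)

theorem solLoopA_eq_valLoop (ps : List (Int × Int)) : ∀ (k a : Int),
    solLoopA ps k a = pvValLoop (ps.map (·.2)) k a := by
  induction ps with
  | nil => intro k a; rfl
  | cons kv rest ih =>
      intro k a
      simp only [solLoopA, pvValLoop, List.map]
      split <;> simp [ih]

theorem takeGroupsB_valLoop (c : Int) : ∀ (g : Nat) (rest : List Int) (rem ans : Int),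
    pvValLoop (List.replicate g c ++ rest) rem ans =
      (match takeGroupsB c g rem ans with
       | (_, ans', true) => ans'
       | (rem', ans', false) => pvValLoop rest rem' ans') := by
  intro g
  induction g with
  | zero => intro rest rem ans; rfl
  | succ g ih =>
      intro rest rem ans
      simp only [List.replicate_succ, List.cons_append, pvValLoop, takeGroupsB]
      split <;> simp [ih]

theorem bucketLoopB_eq_valLoop (bucket : List Int) : ∀ (cs : List Int) (rem ans : Int),
    bucketLoopB bucket cs rem ans =
      pvValLoop (cs.flatMap fun c => List.replicate (PySem.List.pyGetD bucket c 0).toNat c) rem ans := by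
  intro cs
  induction cs with
  | nil => intro rem ans; rfl
  | cons c cs ih =>
      intro rem ans
      simp only [bucketLoopB, List.flatMap_cons]
      rw [takeGroupsB_valLoop]
      rcases h : takeGroupsB c (PySem.List.pyGetD bucket c 0).toNat rem ans with ⟨r', a', done⟩
      cases done <;> simp [ih]

-- A's counting loop builds exactly Counter(tangerine)
theorem foldlA_eq_counter (xs : List Int) :
    (PySem.List.enumerate xs 0).foldl
      (fun d ig => if ¬ d.contains ig.2 then d.insert ig.2 1
                   else d.insert ig.2 (d.getD ig.2 0 + 1)) PySem.Dict.empty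
      = PySem.Dict.counter xs := by
  have hfun : (fun (d : PySem.Dict Int Int) (x : Int) =>
      if ¬ d.contains x then d.insert x 1 else d.insert x (d.getD x 0 + 1))
      = fun d x => d.insert x (d.getD x 0 + 1) := by
    funext d x
    by_cases h : d.contains x
    · simp [h]
    · rw [PySem.Dict.getD_of_not_contains _ (0 : Int) (by simpa using h)]
      simp [h]
  have henum : ∀ (ys : List Int) (s : Int) (d : PySem.Dict Int Int),
      (PySem.List.enumerate ys s).foldl
        (fun d (ig : Int × Int) => if ¬ d.contains ig.2 then d.insert ig.2 1
                     else d.insert ig.2 (d.getD ig.2 0 + 1)) d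
      = ys.foldl (fun d x => if ¬ d.contains x then d.insert x 1
                     else d.insert x (d.getD x 0 + 1)) d := by
    intro ys
    induction ys with
    | nil => intro s d; rfl
    | cons y ys ih =>
        intro s d
        simp only [PySem.List.enumerate_cons, List.foldl_cons]
        exact ih _ _
  rw [henum, hfun, PySem.Dict.foldl_insert_getD_add_one_eq_counter]

-- bucket lookup = multiplicity of c among the folded values
theorem bucket_getD (vs : List Int) : ∀ (b : List Int) (c : Int), 0 ≤ c → c < (b.length : Int) →
    (∀ v ∈ vs, 0 ≤ v ∧ v < (b.length : Int)) →
    PySem.List.pyGetD (vs.foldl (fun (b : List Int) (c : Int) => b.set c.toNat (PySem.List.pyGetD b c 0 + 1)) b) c 0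
      = PySem.List.pyGetD b c 0 + vs.count c := by
  induction vs with
  | nil => intro b c _ _ _; simp
  | cons v vs ih =>
      intro b c hc0 hclen hmem
      obtain ⟨hv0, hvlen⟩ := hmem v (by simp)
      have hlen' : ((b.set v.toNat (PySem.List.pyGetD b v 0 + 1)).length : Int) = b.length := by
        simp
      simp only [List.foldl_cons]
      rw [ih _ c hc0 (by rw [hlen']; exact hclen)
        (fun w hw => by rw [hlen']; exact hmem w (by simp [hw]))]
      rw [PySem.List.pyGetD_eq_getElem _ _ hc0 (by rw [hlen']; exact hclen),
          PySem.List.pyGetD_eq_getElem _ _ hc0 hclen]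
      by_cases hvc : v = c
      · subst hvc
        have hx : PySem.List.pyGetD b v 0 = b[v.toNat]'(by omega) :=
          PySem.List.pyGetD_eq_getElem _ _ hv0 hvlen
        simp [hx]
        omega
      · have hne : v.toNat ≠ c.toNat := by omega
        simp [hne, hvc]

-- flatMap of per-value replicates over a nodup cover is a permutation of the values
theorem flatMap_congr' {α β : Type} (l : List α) (f g : α → List β)
    (h : ∀ x ∈ l, f x = g x) : l.flatMap f = l.flatMap g := by
  induction l with
  | nil => rfl
  | cons x l ih =>
      simp only [List.flatMap_cons, h x (by simp)]
      rw [ih (fun y hy => h y (by simp [hy]))]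

theorem perm_flatMap_replicate_count : ∀ (cs vs : List Int), cs.Nodup →
    (∀ v ∈ vs, v ∈ cs) →
    (cs.flatMap fun c => List.replicate (vs.count c) c).Perm vs := by
  intro cs
  induction cs with
  | nil =>
      intro vs _ h
      have : vs = [] := List.eq_nil_iff_forall_not_mem.2 (fun v hv => by simpa using h v hv)
      simp [this]
  | cons c cs ih =>
      intro vs hnd h
      simp only [List.flatMap_cons]
      have hrep : List.replicate (vs.count c) c = vs.filter (fun x => x == c) :=
        (List.filter_beq c).symm
      set vs' := vs.filter (fun v => !(v == c)) with hvs'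
      have hcnt : ∀ c' ∈ cs, vs.count c' = vs'.count c' := by
        intro c' hc'
        have hne : c' ≠ c := by
          rintro rfl; exact (List.nodup_cons.1 hnd).1 hc'
        rw [hvs', List.count_filter (by simp [hne])]
      have hflat : (cs.flatMap fun c' => List.replicate (vs.count c') c')
          = cs.flatMap fun c' => List.replicate (vs'.count c') c' :=
        flatMap_congr' _ _ _ (fun c' hc' => by rw [hcnt c' hc'])
      rw [hflat, hrep]
      have hperm' : (cs.flatMap fun c' => List.replicate (vs'.count c') c').Perm vs' := by
        apply ih vs' (List.nodup_cons.1 hnd).2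
        intro v hv
        have hvmem : v ∈ vs := List.mem_of_mem_filter hv
        have hne : ¬ (v == c) = true := by
          have := List.of_mem_filter hv; simpa using this
        have := h v hvmem
        simp only [List.mem_cons] at this
        rcases this with rfl | hin
        · exact absurd (by simp) hne
        · exact hin
      exact (hperm'.append_left _).trans (List.filter_append_perm (fun x => x == c) vs)

theorem pairwise_flatMap_replicate (f : Int → Nat) :
    ∀ (cs : List Int), cs.Pairwise (· > ·) →
    (cs.flatMap fun c => List.replicate (f c) c).Pairwise (fun a b => b ≤ a) := by
  intro cs
  induction cs with
  | nil => intro _; simp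
  | cons c cs ih =>
      intro h
      obtain ⟨hhead, htail⟩ := List.pairwise_cons.1 h
      simp only [List.flatMap_cons]
      rw [List.pairwise_append]
      refine ⟨List.pairwise_replicate.2 (by simp), ih htail, ?_⟩
      intro x hx y hy
      have hxc : x = c := List.eq_of_mem_replicate hx
      obtain ⟨c', hc', hy'⟩ := List.mem_flatMap.1 hy
      have hyc : y = c' := List.eq_of_mem_replicate hy'
      subst hxc; subst hyc
      exact le_of_lt (hhead _ hc')

-- the descending count sequences of A and of B coincide
theorem seq_eq (tangerine : List Int) :
    ((PySem.List.sorted (PySem.Dict.counter tangerine).items (fun x => x.2) true).map (·.2))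
      = (PySem.List.pyRange (tangerine.length : Int) 0 (-1)).flatMap
          (fun c => List.replicate
            (PySem.List.pyGetD
              ((PySem.Dict.counter tangerine).values.foldl
                (fun (b : List Int) (c : Int) => b.set c.toNat (PySem.List.pyGetD b c 0 + 1))
                (List.replicate ((tangerine.length : Int).toNat + 1) 0)) c 0).toNat c) := by
  set n : Int := (tangerine.length : Int) with hn
  set vs := (PySem.Dict.counter tangerine).values with hvs
  -- facts about the values list
  have hvals : vs = (PySem.Set.ofList tangerine).map (fun k => (tangerine.count k : Int)) := by
    rw [hvs, show (PySem.Dict.counter tangerine).values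
        = ((PySem.Dict.counter tangerine).items).map (·.2) from rfl,
      PySem.Dict.items_counter, List.map_map]
    rfl
  have hbound : ∀ v ∈ vs, 1 ≤ v ∧ v ≤ n := by
    intro v hv
    rw [hvals] at hv
    obtain ⟨x, hx, rfl⟩ := List.mem_map.1 hv
    have hxmem : x ∈ tangerine := (PySem.Set.mem_ofList _ _).1 hx
    constructor
    · have : 0 < tangerine.count x := List.count_pos_iff.2 hxmem
      exact_mod_cast this
    · have : tangerine.count x ≤ tangerine.length := List.count_le_length
      rw [hn]; exact_mod_cast this
  -- the range list
  have hrange : PySem.List.pyRange n 0 (-1) = (PySem.List.pyRange (0 + 1) (n + 1)).reverse :=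
    PySem.List.pyRange_neg_one_eq_reverse n 0
  have hrnodup : (PySem.List.pyRange n 0 (-1)).Nodup := by
    rw [hrange]; exact List.nodup_reverse.2 (PySem.List.nodup_pyRange_one _ _)
  have hrdesc : (PySem.List.pyRange n 0 (-1)).Pairwise (· > ·) := by
    rw [hrange, List.pairwise_reverse]
    exact PySem.List.pairwise_lt_pyRange_one _ _
  have hmemrange : ∀ v ∈ vs, v ∈ PySem.List.pyRange n 0 (-1) := by
    intro v hv
    obtain ⟨h1, h2⟩ := hbound v hv
    rw [PySem.List.mem_pyRange_neg_one]
    omega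
  -- bucket lookup = count in vs
  have hbucket : ∀ c ∈ PySem.List.pyRange n 0 (-1),
      (PySem.List.pyGetD
        (vs.foldl (fun (b : List Int) (c : Int) => b.set c.toNat (PySem.List.pyGetD b c 0 + 1))
          (List.replicate (n.toNat + 1) 0)) c 0).toNat = vs.count c := by
    intro c hc
    rw [PySem.List.mem_pyRange_neg_one] at hc
    have hn0 : 0 ≤ n := by rw [hn]; exact Int.natCast_nonneg _
    have hlen : ((List.replicate (n.toNat + 1) (0 : Int)).length : Int) = n + 1 := by
      simp; omega
    rw [bucket_getD vs _ c (by omega) (by rw [hlen]; omega)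
      (fun v hv => ⟨by have := (hbound v hv).1; omega,
        by rw [hlen]; have := (hbound v hv).2; omega⟩)]
    rw [PySem.List.pyGetD_eq_getElem _ _ (by omega) (by rw [hlen]; omega)]
    simp
  -- rewrite the flatMap to use vs.count
  have hflat : (PySem.List.pyRange n 0 (-1)).flatMap
      (fun c => List.replicate
        (PySem.List.pyGetD
          (vs.foldl (fun (b : List Int) (c : Int) => b.set c.toNat (PySem.List.pyGetD b c 0 + 1))
            (List.replicate (n.toNat + 1) 0)) c 0).toNat c)
      = (PySem.List.pyRange n 0 (-1)).flatMap (fun c => List.replicate (vs.count c) c) :=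
    flatMap_congr' _ _ _ (fun c hc => by rw [hbucket c hc])
  rw [hflat]
  -- both sides: permutations of vs, both weakly descending, hence equal
  have hpermB : ((PySem.List.pyRange n 0 (-1)).flatMap
      (fun c => List.replicate (vs.count c) c)).Perm vs :=
    perm_flatMap_replicate_count _ _ hrnodup hmemrange
  have hpermA : ((PySem.List.sorted (PySem.Dict.counter tangerine).items (fun x => x.2) true).map (·.2)).Perm vs := by
    have := PySem.List.sorted_perm (PySem.Dict.counter tangerine).items (fun x : Int × Int => x.2) true
    rw [hvs, show (PySem.Dict.counter tangerine).values
        = ((PySem.Dict.counter tangerine).items).map (·.2) from rfl]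
    exact this.map (·.2)
  have hdescA : ((PySem.List.sorted (PySem.Dict.counter tangerine).items (fun x : Int × Int => x.2) true).map (·.2)).Pairwise (fun a b => b ≤ a) := by
    have := PySem.List.sorted_pairwise_rev (PySem.Dict.counter tangerine).items (fun x : Int × Int => x.2)
    exact List.Pairwise.map _ (fun a b h => h) this
  have hdescB : ((PySem.List.pyRange n 0 (-1)).flatMap
      (fun c => List.replicate (vs.count c) c)).Pairwise (fun a b => b ≤ a) :=
    pairwise_flatMap_replicate _ _ hrdesc
  exact (hpermA.trans hpermB.symm).eq_of_pairwise
    (fun _ _ _ _ h1 h2 => le_antisymm h2 h1) hdescA hdescB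

-- ===== VERDICT (by name: the statement is the Claim_ definition above) =====
theorem solution_spec : Claim_equal_solution := by
  intro k tangerine _
  unfold Spec_solution solution solution_alt
  simp only []
  rw [foldlA_eq_counter, PySem.Dict.foldl_insert_getD_add_one_eq_counter]
  rw [solLoopA_eq_valLoop, bucketLoopB_eq_valLoop, seq_eq]
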